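-- pv_equiv track=rewrite | github.com/valthalion/aoc2015 | puzzle16.py | match2
-- ===== SOURCE A (Python) =====
-- equal_keys = ('children', 'samoyeds', 'akitas', 'vizslas', 'cars', 'perfumes')
--
-- gt_keys = ('cats', 'trees')
--
-- lt_keys = ('pomeranians', 'goldfish')
--
-- def match2(sues, readout):
--     return [
--         sue
--         for sue, data in sues.items()
--         if (
--             all(readout[k] == v for k, v in data.items() if k in equal_keys) and
--             all(v > readout[k] for k, v in data.items() if k in gt_keys) and
--             all(v < readout[k] for k, v in data.items() if k in lt_keys)
--            )
--     ]
-- ===== SOURCE B (Python) =====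
-- equal_keys = ('children', 'samoyeds', 'akitas', 'vizslas', 'cars', 'perfumes')
--
-- gt_keys = ('cats', 'trees')
--
-- lt_keys = ('pomeranians', 'goldfish')
--
-- # One comparison table built once: key -> binary predicate on (candidate value, readout value).
-- _rules = {}
-- for _k in equal_keys:
--     _rules[_k] = lambda v, r: v == r
-- for _k in gt_keys:
--     _rules[_k] = lambda v, r: v > r
-- for _k in lt_keys:
--     _rules[_k] = lambda v, r: v < r
--
-- def match2(sues, readout):
--     result = []
--     for sue, data in sues.items():
--         if all(_rules[k](v, readout[k]) for k, v in data.items() if k in _rules):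
--             result.append(sue)
--     return result
-- ===== Notes on version B (the rewrite author's own statement) =====
-- stated objective: alternative
-- what changed: B precomputes one dict mapping each category key to its comparison predicate and decides each sue with a single table-driven pass over its data (explicit loop + append), instead of A's three separately-filtered all(...) scans inside a comprehension.
-- outside the precondition, e.g. on match2({'s1': {'cats': 1, 'children': 0}}, {'children': 5}): A returns [], B raises KeyError
import Mathlib
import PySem

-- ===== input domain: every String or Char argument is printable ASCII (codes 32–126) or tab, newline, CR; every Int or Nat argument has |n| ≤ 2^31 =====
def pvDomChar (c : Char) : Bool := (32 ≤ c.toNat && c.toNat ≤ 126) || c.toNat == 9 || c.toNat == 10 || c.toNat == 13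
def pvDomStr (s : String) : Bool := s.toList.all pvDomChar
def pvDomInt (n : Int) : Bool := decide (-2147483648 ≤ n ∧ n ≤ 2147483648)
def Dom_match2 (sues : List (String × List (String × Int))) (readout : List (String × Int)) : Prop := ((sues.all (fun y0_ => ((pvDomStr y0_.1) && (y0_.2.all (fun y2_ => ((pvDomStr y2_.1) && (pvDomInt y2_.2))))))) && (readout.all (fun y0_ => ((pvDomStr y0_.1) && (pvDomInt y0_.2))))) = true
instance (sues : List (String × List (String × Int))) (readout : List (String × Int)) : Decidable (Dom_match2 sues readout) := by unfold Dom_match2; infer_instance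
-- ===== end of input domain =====

-- B replaces A's three filtered all(...) scans per sue by one pass over the data with a
-- precomputed key → comparison-predicate table; equivalence is about the return value only.

-- ===== PORT A =====
def equalKeysL : List String := ["children", "samoyeds", "akitas", "vizslas", "cars", "perfumes"]
def gtKeysL : List String := ["cats", "trees"]
def ltKeysL : List String := ["pomeranians", "goldfish"]

-- readout[k] == v  (none = KeyError, excluded by Pre_)
def aCheckEq (readout : List (String × Int)) (kv : String × Int) : Bool :=
  match List.lookup kv.1 readout with
  | some x => x == kv.2
  | none => false

-- v > readout[k]
def aCheckGt (readout : List (String × Int)) (kv : String × Int) : Bool :=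
  match List.lookup kv.1 readout with
  | some x => decide (kv.2 > x)
  | none => false

-- v < readout[k]
def aCheckLt (readout : List (String × Int)) (kv : String × Int) : Bool :=
  match List.lookup kv.1 readout with
  | some x => decide (kv.2 < x)
  | none => false

def match2 (sues : List (String × List (String × Int))) (readout : List (String × Int)) : List String :=
  (sues.filter (fun p =>
    (p.2.filter (fun kv => equalKeysL.contains kv.1)).all (aCheckEq readout) &&
    (p.2.filter (fun kv => gtKeysL.contains kv.1)).all (aCheckGt readout) &&
    (p.2.filter (fun kv => ltKeysL.contains kv.1)).all (aCheckLt readout))).map (·.1)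

-- ===== PORT B =====
-- the _rules table of Source B: three loops appending fresh (key, predicate) entries
def rulesB : List (String × (Int → Int → Bool)) :=
  equalKeysL.map (fun k => (k, fun v r => v == r)) ++
  gtKeysL.map (fun k => (k, fun v r => decide (v > r))) ++
  ltKeysL.map (fun k => (k, fun v r => decide (v < r)))

-- _rules[k](v, readout[k]) for one data item, skipped when k not in _rules
def bElem (readout : List (String × Int)) (kv : String × Int) : Bool :=
  match List.lookup kv.1 rulesB with
  | none => true
  | some f =>
    match List.lookup kv.1 readout with
    | some x => f kv.2 x
    | none => false

def match2_alt (sues : List (String × List (String × Int))) (readout : List (String × Int)) : List String :=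
  sues.foldl (fun result p => if p.2.all (bElem readout) then result ++ [p.1] else result) []

-- ===== PRECONDITION & SPEC =====
-- Pre_ excludes inputs where some sue's data contains a category key missing from readout:
-- there readout[k] raises KeyError in B's single pass (and in A too, unless an earlier failed
-- pass short-circuits); A sometimes still returns on such inputs, B raises (see claim cites).
def Pre_match2 (sues : List (String × List (String × Int))) (readout : List (String × Int)) : Prop :=
  ∀ p ∈ sues, ∀ kv ∈ p.2,
    (equalKeysL.contains kv.1 || gtKeysL.contains kv.1 || ltKeysL.contains kv.1) = true →
    (List.lookup kv.1 readout).isSome = true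
instance (sues : List (String × List (String × Int))) (readout : List (String × Int)) : Decidable (Pre_match2 sues readout) := by unfold Pre_match2; infer_instance

def pvWitness_match2 : (List (String × List (String × Int))) × (List (String × Int)) :=
  ([("1", [("cats", 8), ("children", 3)])], [("cats", 7), ("children", 3)])

def Spec_match2 (sues : List (String × List (String × Int))) (readout : List (String × Int)) (out : List String) : Prop := out = match2_alt sues readout
instance (sues : List (String × List (String × Int))) (readout : List (String × Int)) (out : List String) : Decidable (Spec_match2 sues readout out) := by unfold Spec_match2; infer_instance

-- ===== CLAIM (what is proved, stated in full; the proofs are below) =====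
def Claim_equal_match2 : Prop := ∀ (sues : List (String × List (String × Int))) (readout : List (String × Int)), Dom_match2 sues readout → Pre_match2 sues readout → Spec_match2 sues readout (match2 sues readout)

-- ===== LEMMAS AND PROOFS =====

theorem match_eq_comm (o : Option Int) (v : Int) :
    (match o with | some x => decide (x = v) | none => false) =
    (match o with | some x => decide (v = x) | none => false) := by
  cases o <;> simp [eq_comm]

-- per data item: A's three category checks (each guarded by its membership test) agree with
-- B's single table lookup, for every key (both fall back to false on a missing readout key)
theorem elem_eq (readout : List (String × Int)) (kv : String × Int) :
    ((!equalKeysL.contains kv.1 || aCheckEq readout kv) &&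
     (!gtKeysL.contains kv.1 || aCheckGt readout kv) &&
     (!ltKeysL.contains kv.1 || aCheckLt readout kv)) = bElem readout kv := by
  obtain ⟨k, v⟩ := kv
  by_cases h1 : k = "children" <;>
    [skip; by_cases h2 : k = "samoyeds"] <;>
    [skip; skip; by_cases h3 : k = "akitas"] <;>
    [skip; skip; skip; by_cases h4 : k = "vizslas"] <;>
    [skip; skip; skip; skip; by_cases h5 : k = "cars"] <;>
    [skip; skip; skip; skip; skip; by_cases h6 : k = "perfumes"] <;>
    [skip; skip; skip; skip; skip; skip; by_cases h7 : k = "cats"] <;>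
    [skip; skip; skip; skip; skip; skip; skip; by_cases h8 : k = "trees"] <;>
    [skip; skip; skip; skip; skip; skip; skip; skip; by_cases h9 : k = "pomeranians"] <;>
    [skip; skip; skip; skip; skip; skip; skip; skip; skip; by_cases h10 : k = "goldfish"] <;>
    simp_all [aCheckEq, aCheckGt, aCheckLt, bElem, rulesB, equalKeysL, gtKeysL, ltKeysL,
      List.lookup, beq_eq_decide] <;>
    (try exact match_eq_comm _ _)

-- per sue: A's conjunction of three filtered alls equals B's one pass
theorem cond_eq (readout : List (String × Int)) (d : List (String × Int)) :
    ((d.filter (fun kv => equalKeysL.contains kv.1)).all (aCheckEq readout) &&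
     (d.filter (fun kv => gtKeysL.contains kv.1)).all (aCheckGt readout) &&
     (d.filter (fun kv => ltKeysL.contains kv.1)).all (aCheckLt readout)) =
    d.all (bElem readout) := by
  induction d with
  | nil => rfl
  | cons kv t ih =>
    simp only [List.filter_cons, List.all_cons]
    rcases hkv : bElem readout kv with _ | _ <;>
    · have := elem_eq readout kv
      rw [hkv] at this
      split_ifs with c1 c2 c3 <;> simp_all

-- ===== VERDICT (by name: the statement is the Claim_ definition above) =====
theorem match2_spec : Claim_equal_match2 := by
  intro sues readout _ _
  unfold Spec_match2 match2 match2_alt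
  rw [PySem.List.foldl_append_if (fun p : String × List (String × Int) => p.2.all (bElem readout)) (·.1)]
  simp only [List.nil_append]
  congr 1
  apply List.filter_congr
  intro p _
  exact cond_eq readout p.2
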